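-- pv_equiv track=rewrite | github.com/junsoopablo/L1-m6A-polyA | analysis/topic_05_cellline/m6a_drach_by_subfamily_region.py | assign_subfam_group
-- ===== SOURCE A (Python) =====
-- SUBFAMILY_GROUPS = {
--     'L1PA': ['L1PA4', 'L1PA5', 'L1PA6', 'L1PA7', 'L1PA8', 'L1PA8A',
--              'L1PA10', 'L1PA11', 'L1PA12', 'L1PA13', 'L1PA14',
--              'L1PA15', 'L1PA16', 'L1PA17'],
--     'L1PB': ['L1PB', 'L1PB1', 'L1PB2', 'L1PB3', 'L1PB4'],
--     'L1MC': ['L1MC', 'L1MC1', 'L1MC2', 'L1MC3', 'L1MC4', 'L1MC4a',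
--              'L1MC5', 'L1MC5a', 'L1MCa', 'L1MCb'],
--     'L1ME': ['L1ME1', 'L1ME2', 'L1ME2z', 'L1ME3', 'L1ME3A', 'L1ME3B',
--              'L1ME3C', 'L1ME3Cz', 'L1ME3D', 'L1ME3E', 'L1ME3F',
--              'L1ME3G', 'L1ME4a', 'L1ME4b', 'L1ME4c', 'L1ME5',
--              'L1MEa', 'L1MEb', 'L1MEc', 'L1MEd', 'L1MEe', 'L1MEf',
--              'L1MEg', 'L1MEg2', 'L1MEh', 'L1MEi'],
--     'L1M': ['L1M', 'L1M1', 'L1M2', 'L1M2a', 'L1M2a1', 'L1M2b',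
--             'L1M2c', 'L1M3', 'L1M3a', 'L1M3b', 'L1M3c', 'L1M3d',
--             'L1M3de', 'L1M3e', 'L1M3f', 'L1M4', 'L1M4a1', 'L1M4a2',
--             'L1M4b', 'L1M4c', 'L1M5', 'L1M6', 'L1M6B', 'L1M7',
--             'L1M8', 'L1Ma1', 'L1Ma2', 'L1Ma3', 'L1Ma4', 'L1Ma5',
--             'L1Ma6', 'L1Ma7', 'L1Ma8', 'L1Ma9', 'L1Mb1', 'L1Mb2',
--             'L1Mb3', 'L1Mb4', 'L1Mb5', 'L1Mb6', 'L1Mb7', 'L1Mb8'],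
-- }
--
-- def assign_subfam_group(gene_id):
--     for grp_name, members in SUBFAMILY_GROUPS.items():
--         if gene_id in members:
--             return grp_name
--     # Try prefix match for unlisted members
--     for grp_name in ['L1PA', 'L1PB', 'L1MC', 'L1ME', 'L1M']:
--         if gene_id.startswith(grp_name):
--             return grp_name
--     return 'Other'
-- ===== SOURCE B (Python) =====
-- def assign_subfam_group(gene_id):
--     # Single prefix scan: every listed member starts with its group's name and the
--     # specific prefixes precede 'L1M', so the membership table is unnecessary.
--     for grp_name in ['L1PA', 'L1PB', 'L1MC', 'L1ME', 'L1M']: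
--         if gene_id.startswith(grp_name):
--             return grp_name
--     return 'Other'
-- ===== Notes on version B (the rewrite author's own statement) =====
-- stated objective: simpler
-- what changed: B drops the membership table and its first scan entirely and classifies by a single ordered prefix scan, which is provably equivalent because every table entry starts with its group's name and the specific prefixes precede 'L1M'.
import Mathlib
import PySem

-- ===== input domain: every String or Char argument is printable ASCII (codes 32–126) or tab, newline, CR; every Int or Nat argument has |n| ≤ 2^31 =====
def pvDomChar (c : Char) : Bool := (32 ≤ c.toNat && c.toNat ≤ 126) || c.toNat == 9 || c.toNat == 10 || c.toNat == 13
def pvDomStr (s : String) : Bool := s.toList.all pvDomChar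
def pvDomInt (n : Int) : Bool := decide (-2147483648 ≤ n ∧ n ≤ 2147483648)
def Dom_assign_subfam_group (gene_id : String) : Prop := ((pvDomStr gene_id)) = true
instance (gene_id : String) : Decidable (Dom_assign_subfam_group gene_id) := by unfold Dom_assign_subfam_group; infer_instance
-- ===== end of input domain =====

-- B replaces A's membership-table scan + prefix fallback by a single ordered prefix scan (simpler).


-- ===== PORT A =====
def SUBFAMILY_GROUPS : List (String × List String) :=
  [("L1PA", ["L1PA4", "L1PA5", "L1PA6", "L1PA7", "L1PA8", "L1PA8A",
             "L1PA10", "L1PA11", "L1PA12", "L1PA13", "L1PA14",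
             "L1PA15", "L1PA16", "L1PA17"]),
   ("L1PB", ["L1PB", "L1PB1", "L1PB2", "L1PB3", "L1PB4"]),
   ("L1MC", ["L1MC", "L1MC1", "L1MC2", "L1MC3", "L1MC4", "L1MC4a",
             "L1MC5", "L1MC5a", "L1MCa", "L1MCb"]),
   ("L1ME", ["L1ME1", "L1ME2", "L1ME2z", "L1ME3", "L1ME3A", "L1ME3B",
             "L1ME3C", "L1ME3Cz", "L1ME3D", "L1ME3E", "L1ME3F",
             "L1ME3G", "L1ME4a", "L1ME4b", "L1ME4c", "L1ME5",
             "L1MEa", "L1MEb", "L1MEc", "L1MEd", "L1MEe", "L1MEf",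
             "L1MEg", "L1MEg2", "L1MEh", "L1MEi"]),
   ("L1M", ["L1M", "L1M1", "L1M2", "L1M2a", "L1M2a1", "L1M2b",
            "L1M2c", "L1M3", "L1M3a", "L1M3b", "L1M3c", "L1M3d",
            "L1M3de", "L1M3e", "L1M3f", "L1M4", "L1M4a1", "L1M4a2",
            "L1M4b", "L1M4c", "L1M5", "L1M6", "L1M6B", "L1M7",
            "L1M8", "L1Ma1", "L1Ma2", "L1Ma3", "L1Ma4", "L1Ma5",
            "L1Ma6", "L1Ma7", "L1Ma8", "L1Ma9", "L1Mb1", "L1Mb2",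
            "L1Mb3", "L1Mb4", "L1Mb5", "L1Mb6", "L1Mb7", "L1Mb8"])]

-- first loop of A: return the first group whose member list contains gene_id
def pyMemLoop (items : List (String × List String)) (g : String) : Option String :=
  match items with
  | [] => none
  | (grp, ms) :: rest => if g ∈ ms then some grp else pyMemLoop rest g

-- second loop of A: return the first prefix that matches
def pyPrefixLoop (ps : List String) (g : String) : Option String :=
  match ps with
  | [] => none
  | p :: rest => if PySem.Str.startswith g p then some p else pyPrefixLoop rest g

def assign_subfam_group (gene_id : String) : String :=
  match pyMemLoop SUBFAMILY_GROUPS gene_id with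
  | some r => r
  | none =>
    match pyPrefixLoop ["L1PA", "L1PB", "L1MC", "L1ME", "L1M"] gene_id with
    | some r => r
    | none => "Other"

-- ===== PORT B =====
def altScan (ps : List String) (g : String) : String :=
  match ps with
  | [] => "Other"
  | p :: rest => if PySem.Str.startswith g p then p else altScan rest g

def assign_subfam_group_alt (gene_id : String) : String :=
  altScan ["L1PA", "L1PB", "L1MC", "L1ME", "L1M"] gene_id

-- ===== PRECONDITION & SPEC =====
def Spec_assign_subfam_group (gene_id : String) (out : String) : Prop := out = assign_subfam_group_alt gene_id
instance (gene_id : String) (out : String) : Decidable (Spec_assign_subfam_group gene_id out) := by unfold Spec_assign_subfam_group; infer_instance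

-- ===== CLAIM (what is proved, stated in full; the proofs are below) =====
def Claim_equal_assign_subfam_group : Prop := ∀ (gene_id : String), Dom_assign_subfam_group gene_id → Spec_assign_subfam_group gene_id (assign_subfam_group gene_id)

-- ===== LEMMAS AND PROOFS =====

-- A's prefix-fallback (with the "Other" default) is exactly B's scan.
theorem prefixLoop_eq_altScan (ps : List String) (g : String) :
    (match pyPrefixLoop ps g with | some r => r | none => "Other") = altScan ps g := by
  induction ps with
  | nil => rfl
  | cons p rest ih =>
    simp only [pyPrefixLoop, altScan]
    split_ifs <;> simp [ih]

-- membership in a list all of whose elements B maps to `out` forces B's value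
theorem alt_of_mem (ms : List String) (out : String)
    (h : ms.all (fun m => assign_subfam_group_alt m == out) = true) :
    ∀ g ∈ ms, assign_subfam_group_alt g = out := by
  intro g hg
  have := List.all_eq_true.mp h g hg
  simpa using this

-- ===== VERDICT (by name: the statement is the Claim_ definition above) =====
theorem assign_subfam_group_spec : Claim_equal_assign_subfam_group := by
  intro g _
  show assign_subfam_group g = assign_subfam_group_alt g
  unfold assign_subfam_group
  simp only [SUBFAMILY_GROUPS, pyMemLoop]
  split_ifs with h1 h2 h3 h4 h5
  · exact (alt_of_mem _ "L1PA" (by decide) g h1).symm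
  · exact (alt_of_mem _ "L1PB" (by decide) g h2).symm
  · exact (alt_of_mem _ "L1MC" (by decide) g h3).symm
  · exact (alt_of_mem _ "L1ME" (by decide) g h4).symm
  · exact (alt_of_mem _ "L1M" (by decide) g h5).symm
  · exact prefixLoop_eq_altScan _ g
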